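-- pv_equiv track=rewrite | github.com/eduardobehr/power-electronics | Buck Converter/classes.py | colapse_duplicates
-- ===== SOURCE A (Python) =====
-- POW_DICT = {
--     0:'⁰',
--     1:'¹',
--     2:'²',
--     3:'³',
--     4:'⁴',
--     5:'⁵',
--     6:'⁶',
--     7:'⁷',
--     8:'⁸',
--     9:'⁹',
--     '.': '⋅'
-- }
--
-- def colapse_duplicates(count_dict: dict, string: str) -> str:
--     """
--     Takes a str and a dict counting its chars, returns a str with exponentiation
--     E.g.: '(m)/(ss)' -> '(m)/(s²)'
--     """
--     ret = string
--     duplicates = count_dict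
--     for key in duplicates:
--         if key.isalpha() and duplicates[key] > 1:
--             ret = ret.replace(key, '', duplicates[key]-1)
--             ret = ret.replace(key, key + POW_DICT[duplicates[key]], 1)
--     return ret
-- ===== SOURCE B (Python) =====
-- POW_DICT = {
--     0:'⁰',
--     1:'¹',
--     2:'²',
--     3:'³',
--     4:'⁴',
--     5:'⁵',
--     6:'⁶',
--     7:'⁷',
--     8:'⁸',
--     9:'⁹',
--     '.': '⋅'
-- }
--
-- def colapse_duplicates(count_dict: dict, string: str) -> str:
--     """
--     Takes a str and a dict counting its chars, returns a str with exponentiation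
--     E.g.: '(m)/(ss)' -> '(m)/(s²)'
--     """
--     # pass 1: exponent table for the qualifying keys
--     info = {}
--     for key, cnt in count_dict.items():
--         if key.isalpha() and cnt > 1:
--             info[key] = (cnt, POW_DICT[cnt])
--     # pass 2: one left-to-right scan with a per-char seen counter
--     out = []
--     seen = {}
--     for ch in string:
--         entry = info.get(ch)
--         if entry is None:
--             out.append(ch)
--         else:
--             cnt, sup = entry
--             j = seen.get(ch, 0) + 1
--             seen[ch] = j
--             if j < cnt:
--                 pass            # one of the first cnt-1 occurrences: dropped
--             elif j == cnt:
--                 out.append(ch + sup)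
--             else:
--                 out.append(ch)
--     return ''.join(out)
-- ===== Notes on version B (the rewrite author's own statement) =====
-- stated objective: alternative
-- what changed: A mutates the string once per dict key with two str.replace(count) calls; B instead precomputes an exponent table for the qualifying keys and then makes ONE left-to-right scan of the string with a per-char seen counter, dropping the first cnt-1 occurrences, tagging the cnt-th with the superscript and passing everything else through.
-- outside the precondition, e.g. on colapse_duplicates({'ab': 2}, 'abab'): A returns 'ab²', B returns 'abab'
import Mathlib
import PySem

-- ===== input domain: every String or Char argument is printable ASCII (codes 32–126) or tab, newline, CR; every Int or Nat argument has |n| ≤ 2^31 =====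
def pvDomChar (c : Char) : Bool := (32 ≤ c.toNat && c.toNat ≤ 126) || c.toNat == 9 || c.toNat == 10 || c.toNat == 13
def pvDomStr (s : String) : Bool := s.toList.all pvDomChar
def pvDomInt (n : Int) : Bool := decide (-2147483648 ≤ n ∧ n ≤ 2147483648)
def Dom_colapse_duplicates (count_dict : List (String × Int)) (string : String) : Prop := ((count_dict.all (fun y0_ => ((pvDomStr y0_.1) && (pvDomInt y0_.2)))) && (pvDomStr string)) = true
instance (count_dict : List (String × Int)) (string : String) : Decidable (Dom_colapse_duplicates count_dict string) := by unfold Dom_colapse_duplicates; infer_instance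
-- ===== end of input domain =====

-- A rewrites the string once per dict key with two str.replace(count) calls; B precomputes an
-- exponent table for the qualifying keys and then makes ONE left-to-right scan of the string
-- with a per-char seen counter (objective: alternative decomposition).

-- ===== PORT A =====
-- POW_DICT, restricted to the int keys this function can ever look up (the '.' entry is unreachable
-- here); none = KeyError in Python (counts ≥ 10), excluded by Pre_ below.
def powSup? (n : Int) : Option String :=
  if n = 0 then some "⁰" else if n = 1 then some "¹" else if n = 2 then some "²"
  else if n = 3 then some "³" else if n = 4 then some "⁴" else if n = 5 then some "⁵"
  else if n = 6 then some "⁶" else if n = 7 then some "⁷" else if n = 8 then some "⁸"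
  else if n = 9 then some "⁹" else none

-- hand port of Python's s.replace(old, new, n) (PySem.Chars.replace has no count argument):
-- at most n non-overlapping occurrences, scanning left to right; exact for old ≠ [] (A only calls
-- it under key.isalpha(), so old is never empty).
def replaceN (s old new : List Char) (n : Nat) : List Char :=
  match n, s with
  | 0, s => s
  | _ + 1, [] => []
  | n + 1, c :: rest =>
    if old.isPrefixOf (c :: rest) then new ++ replaceN ((c :: rest).drop old.length) old new n
    else c :: replaceN rest old new (n + 1)
termination_by s.length + n
decreasing_by all_goals (simp_all; try omega)

def colapse_duplicates (count_dict : List (String × Int)) (string : String) : String :=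
  let duplicates := PySem.Dict.ofList count_dict
  String.ofList (duplicates.items.foldl (fun ret kv =>
    if PySem.Chars.strIsalpha kv.1.toList && decide (1 < kv.2) then
      replaceN (replaceN ret kv.1.toList [] (kv.2 - 1).toNat) kv.1.toList
        (kv.1.toList ++ ((powSup? kv.2).getD "").toList) 1
    else ret) string.toList)

-- ===== PORT B =====
-- Source B pass 1: the exponent table {key: (cnt, POW_DICT[cnt])} for the qualifying keys.
def buildInfo (items : List (String × Int)) : PySem.Dict String (Int × String) :=
  items.foldl (fun d kv =>
    if PySem.Chars.strIsalpha kv.1.toList && decide (1 < kv.2) then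
      d.insert kv.1 (kv.2, (powSup? kv.2).getD "")
    else d) PySem.Dict.empty

-- Source B pass 2: one scan of the string with the per-char seen counter (the `for ch in string` loop
-- as its structural recursion; `out.append`/`join` becomes consing onto the recursive tail).
def scanB (info : PySem.Dict String (Int × String)) : List Char → PySem.Dict String Int → List Char
  | [], _ => []
  | c :: rest, seen =>
    match info.get? (String.ofList [c]) with
    | some (cnt, sup) =>
      (if seen.getD (String.ofList [c]) 0 + 1 < cnt then []
       else if seen.getD (String.ofList [c]) 0 + 1 = cnt then c :: sup.toList
       else [c]) ++
        scanB info rest (seen.insert (String.ofList [c]) (seen.getD (String.ofList [c]) 0 + 1))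
    | none => c :: scanB info rest seen

def colapse_duplicates_alt (count_dict : List (String × Int)) (string : String) : String :=
  let info := buildInfo (PySem.Dict.ofList count_dict).items
  String.ofList (scanB info string.toList PySem.Dict.empty)

-- ===== PRECONDITION & SPEC =====
-- Pre_ excludes (i) alphabetic keys with count ≥ 10, on which A (and B) raise KeyError looking up
-- POW_DICT, and (ii) multi-character alphabetic keys with count > 1 — outside the documented
-- natural domain ("a dict counting its chars": keys are single characters), where A would do
-- substring replacement while B's per-character scan ignores them.
def Pre_colapse_duplicates (count_dict : List (String × Int)) (_string : String) : Prop :=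
  ∀ kv ∈ (PySem.Dict.ofList count_dict).items,
    PySem.Chars.strIsalpha kv.1.toList = true → 1 < kv.2 → (kv.1.toList.length = 1 ∧ kv.2 ≤ 9)
instance (count_dict : List (String × Int)) (string : String) : Decidable (Pre_colapse_duplicates count_dict string) := by unfold Pre_colapse_duplicates; infer_instance

def pvWitness_colapse_duplicates : (List (String × Int)) × String := ([("m", 1), ("s", 2)], "(m)/(ss)")

def Spec_colapse_duplicates (count_dict : List (String × Int)) (string : String) (out : String) : Prop := out = colapse_duplicates_alt count_dict string
instance (count_dict : List (String × Int)) (string : String) (out : String) : Decidable (Spec_colapse_duplicates count_dict string out) := by unfold Spec_colapse_duplicates; infer_instance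

-- ===== CLAIM (what is proved, stated in full; the proofs are below) =====
def Claim_equal_colapse_duplicates : Prop := ∀ (count_dict : List (String × Int)) (string : String), Dom_colapse_duplicates count_dict string → Pre_colapse_duplicates count_dict string → Spec_colapse_duplicates count_dict string (colapse_duplicates count_dict string)

-- ===== LEMMAS AND PROOFS =====

-- What A's step does to a string for a single-char key [k] with n = cnt-1: a one-pass scan that
-- drops the first n occurrences of k, tags the next with sup, and leaves the rest alone.
def scanKey (k : Char) (sup : List Char) : List Char → Nat → List Char
  | [], _ => []
  | c :: rest, n =>
    if c = k then
      match n with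
      | Nat.succ m => scanKey k sup rest m
      | 0 => c :: (sup ++ rest)
    else c :: scanKey k sup rest n

-- functional counter update
def updF {β : Type} (g : String → β) (key : String) (v : β) : String → β :=
  fun t => if t = key then v else g t

-- scanB with the two dicts abstracted into functions (proof vehicle).
def scanF (f : String → Option (Int × String)) : List Char → (String → Int) → List Char
  | [], _ => []
  | c :: rest, g =>
    match f (String.ofList [c]) with
    | some (cnt, sup) =>
      (if g (String.ofList [c]) + 1 < cnt then []
       else if g (String.ofList [c]) + 1 = cnt then c :: sup.toList
       else [c]) ++
        scanF f rest (updF g (String.ofList [c]) (g (String.ofList [c]) + 1))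
    | none => c :: scanF f rest g

theorem updF_self {β : Type} (g : String → β) (a : String) (v : β) : updF g a v a = v := by
  simp [updF]

theorem updF_of_ne {β : Type} (g : String → β) (a t : String) (v : β) (h : t ≠ a) :
    updF g a v t = g t := by simp [updF, h]

theorem updF_updF_self {β : Type} (g : String → β) (a : String) (u v : β) :
    updF (updF g a u) a v = updF g a v := by
  funext t; by_cases h : t = a <;> simp [updF, h]

theorem updF_comm {β : Type} (g : String → β) (a b : String) (u v : β) (h : a ≠ b) :
    updF (updF g a u) b v = updF (updF g b v) a u := by
  funext t
  by_cases ht : t = a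
  · subst ht; simp [updF, h]
  · by_cases ht2 : t = b
    · subst ht2; simp [updF, Ne.symm h]
    · simp [updF, ht, ht2]

theorem ofList_single_ne (c k : Char) (h : ¬ c = k) :
    String.ofList [c] ≠ String.ofList [k] := by
  intro he
  have := congrArg String.toList he
  simp at this
  exact h this

-- equation lemmas for controlled unfolding
theorem scanKey_cons_self_succ (k : Char) (sup rest : List Char) (m : Nat) :
    scanKey k sup (k :: rest) (m + 1) = scanKey k sup rest m := by simp [scanKey]

theorem scanKey_cons_self_zero (k : Char) (sup rest : List Char) :
    scanKey k sup (k :: rest) 0 = k :: (sup ++ rest) := by simp [scanKey]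

theorem scanKey_cons_ne (k c : Char) (sup rest : List Char) (h : ¬ c = k) (n : Nat) :
    scanKey k sup (c :: rest) n = c :: scanKey k sup rest n := by simp [scanKey, h]

theorem scanF_cons_some (f : String → Option (Int × String)) (c : Char) (rest : List Char)
    (g : String → Int) (cnt : Int) (sup : String)
    (h : f (String.ofList [c]) = some (cnt, sup)) :
    scanF f (c :: rest) g
      = (if g (String.ofList [c]) + 1 < cnt then []
         else if g (String.ofList [c]) + 1 = cnt then c :: sup.toList
         else [c]) ++
          scanF f rest (updF g (String.ofList [c]) (g (String.ofList [c]) + 1)) := by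
  simp [scanF, h]

theorem scanF_cons_none (f : String → Option (Int × String)) (c : Char) (rest : List Char)
    (g : String → Int) (h : f (String.ofList [c]) = none) :
    scanF f (c :: rest) g = c :: scanF f rest g := by
  simp [scanF, h]

-- A's step (two replaceN's) on a single-char key equals the scanKey pass.
theorem astep_eq_scanKey (k : Char) (sup : List Char) :
    ∀ (s : List Char) (n : Nat),
    replaceN (replaceN s [k] [] n) [k] (k :: sup) 1 = scanKey k sup s n := by
  intro s
  induction s with
  | nil => intro n; cases n <;> simp [replaceN, scanKey]
  | cons c rest ih =>
    intro n
    by_cases hck : c = k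
    · subst hck
      cases n with
      | zero => simp [replaceN, scanKey, List.isPrefixOf]
      | succ m => simpa [replaceN, scanKey, List.isPrefixOf] using ih m
    · have hpre : ∀ X : List Char, [k].isPrefixOf (c :: X) = false := by
        intro X
        simp [List.isPrefixOf]
        exact fun h => absurd h.symm hck
      have houter : ∀ X : List Char,
          replaceN (c :: X) [k] (k :: sup) 1 = c :: replaceN X [k] (k :: sup) 1 := by
        intro X; simp [replaceN, hpre X]
      cases n with
      | zero =>
        have hin : replaceN (c :: rest) [k] [] 0 = c :: rest := by simp [replaceN]
        have hz := ih 0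
        rw [show replaceN rest [k] [] 0 = rest from by simp [replaceN]] at hz
        rw [hin, houter, hz, scanKey_cons_ne k c sup rest hck 0]
      | succ m =>
        have hin : replaceN (c :: rest) [k] [] (m + 1) = c :: replaceN rest [k] [] (m + 1) := by
          simp [replaceN, hpre rest]
        rw [hin, houter, ih (m + 1), scanKey_cons_ne k c sup rest hck (m + 1)]

-- the dicts of port B, seen through their lookup functions
theorem scanB_eq_scanF (info : PySem.Dict String (Int × String)) :
    ∀ (s : List Char) (seen : PySem.Dict String Int),
    scanB info s seen = scanF info.get? s (fun t => seen.getD t 0) := by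
  intro s
  induction s with
  | nil => intro seen; simp [scanB, scanF]
  | cons c rest ih =>
    intro seen
    cases h : info.get? (String.ofList [c]) with
    | none => simp [scanB, scanF, h, ih]
    | some e =>
      obtain ⟨cnt, sup⟩ := e
      have hupd : (fun t => (seen.insert (String.ofList [c]) (seen.getD (String.ofList [c]) 0 + 1)).getD t 0)
          = updF (fun t => seen.getD t 0) (String.ofList [c]) (seen.getD (String.ofList [c]) 0 + 1) := by
        funext t; simp [updF, PySem.Dict.getD_insert]
      simp [scanB, scanF, h, ih, hupd]

theorem scanKey_append (k : Char) (sup : List Char) :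
    ∀ (p X : List Char), k ∉ p → ∀ (n : Nat),
    scanKey k sup (p ++ X) n = p ++ scanKey k sup X n := by
  intro p
  induction p with
  | nil => intros; simp
  | cons c q ih =>
    intro X hp n
    have hck : ¬ c = k := fun h => hp (h ▸ List.mem_cons_self ..)
    rw [List.cons_append, scanKey_cons_ne k c sup (q ++ X) hck n,
      ih X (fun h => hp (List.mem_cons_of_mem _ h)) n, List.cons_append]

theorem scanF_of_none (f : String → Option (Int × String)) (hf : ∀ t, f t = none) :
    ∀ (s : List Char) (g : String → Int), scanF f s g = s := by
  intro s
  induction s with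
  | nil => intro g; simp [scanF]
  | cons c rest ih => intro g; simp [scanF, hf, ih]

-- once the counter for k is saturated (≥ cnt), the k-entry of the table is inert
theorem scanF_insert_saturated (f : String → Option (Int × String)) (k : Char) (cnt : Int) (sup : String)
    (hf : f (String.ofList [k]) = none) :
    ∀ (s : List Char) (g1 g2 : String → Int),
      (∀ t, t ≠ String.ofList [k] → g1 t = g2 t) →
      cnt ≤ g1 (String.ofList [k]) →
      scanF (updF f (String.ofList [k]) (some (cnt, sup))) s g1 = scanF f s g2 := by
  intro s
  induction s with
  | nil => intros; simp [scanF]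
  | cons c rest ih =>
    intro g1 g2 hg hsat
    by_cases hc : c = k
    · subst hc
      have h1 : updF f (String.ofList [c]) (some (cnt, sup)) (String.ofList [c]) = some (cnt, sup) :=
        updF_self ..
      rw [scanF_cons_some _ _ _ _ _ _ h1, scanF_cons_none _ _ _ _ hf,
        if_neg (by omega), if_neg (by omega), List.singleton_append]
      refine congrArg (c :: ·) ?_
      exact ih _ g2
        (fun t ht => by rw [updF_of_ne g1 (String.ofList [c]) t _ ht]; exact hg t ht)
        (by rw [updF_self]; omega)
    · have hck : String.ofList [c] ≠ String.ofList [k] := ofList_single_ne c k hc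
      have h1 : updF f (String.ofList [k]) (some (cnt, sup)) (String.ofList [c]) = f (String.ofList [c]) :=
        updF_of_ne _ _ _ _ hck
      cases hfc : f (String.ofList [c]) with
      | none =>
        rw [scanF_cons_none _ _ _ _ (h1.trans hfc), scanF_cons_none _ _ _ _ hfc]
        exact congrArg _ (ih g1 g2 hg hsat)
      | some e =>
        obtain ⟨cnt2, sup2⟩ := e
        have hgc : g1 (String.ofList [c]) = g2 (String.ofList [c]) := hg _ hck
        rw [scanF_cons_some _ _ _ _ _ _ (h1.trans hfc), scanF_cons_some _ _ _ _ _ _ hfc, hgc]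
        congr 1
        refine ih _ _ ?_ ?_
        · intro t ht
          by_cases htc : t = String.ofList [c]
          · subst htc; rw [updF_self, updF_self]
          · rw [updF_of_ne _ _ _ _ htc, updF_of_ne _ _ _ _ htc]; exact hg t ht
        · rw [updF_of_ne g1 (String.ofList [c]) (String.ofList [k]) _ (Ne.symm hck)]; exact hsat

-- the commuting lemma: running A's scanKey pass for a fresh key k over the output of the
-- simultaneous scan equals the simultaneous scan with k's entry added to the table.
theorem scanKey_scanF_comm (f : String → Option (Int × String)) (k : Char) (cnt : Int) (sup : String)
    (hf : f (String.ofList [k]) = none)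
    (hsup : ∀ t e, f t = some e → k ∉ e.2.toList) :
    ∀ (s : List Char) (g : String → Int) (n : Nat) (j : Int),
      j + n + 1 = cnt →
      scanKey k sup.toList (scanF f s g) n
        = scanF (updF f (String.ofList [k]) (some (cnt, sup))) s (updF g (String.ofList [k]) j) := by
  intro s
  induction s with
  | nil => intros; simp [scanF, scanKey]
  | cons c rest ih =>
    intro g n j hcnt
    by_cases hc : c = k
    · subst hc
      have h1 : updF f (String.ofList [c]) (some (cnt, sup)) (String.ofList [c]) = some (cnt, sup) :=
        updF_self ..
      rw [scanF_cons_none _ _ _ _ hf, scanF_cons_some _ _ _ _ _ _ h1, updF_self, updF_updF_self]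
      cases n with
      | zero =>
        have hj : j + 1 = cnt := by push_cast at hcnt; omega
        rw [if_neg (by omega), if_pos hj, scanKey_cons_self_zero,
          scanF_insert_saturated f c cnt sup hf rest (updF g (String.ofList [c]) (j + 1)) g
            (fun t ht => updF_of_ne _ _ _ _ ht) (by rw [updF_self]; omega)]
        simp
      | succ m =>
        rw [if_pos (by push_cast at hcnt; omega), scanKey_cons_self_succ, List.nil_append]
        exact ih g m (j + 1) (by push_cast at hcnt ⊢; omega)
    · have hck : String.ofList [c] ≠ String.ofList [k] := ofList_single_ne c k hc
      have h1 : updF f (String.ofList [k]) (some (cnt, sup)) (String.ofList [c]) = f (String.ofList [c]) :=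
        updF_of_ne _ _ _ _ hck
      have hgc : updF g (String.ofList [k]) j (String.ofList [c]) = g (String.ofList [c]) :=
        updF_of_ne _ _ _ _ hck
      cases hfc : f (String.ofList [c]) with
      | none =>
        rw [scanF_cons_none _ _ _ _ hfc, scanF_cons_none _ _ _ _ (h1.trans hfc),
          scanKey_cons_ne k c sup.toList _ hc n]
        exact congrArg _ (ih g n j hcnt)
      | some e =>
        obtain ⟨cnt2, sup2⟩ := e
        have hks : k ∉ sup2.toList := hsup _ _ hfc
        rw [scanF_cons_some _ _ _ _ _ _ hfc, scanF_cons_some _ _ _ _ _ _ (h1.trans hfc), hgc,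
          updF_comm g (String.ofList [k]) (String.ofList [c]) j (g (String.ofList [c]) + 1)
            (Ne.symm hck),
          ← ih (updF g (String.ofList [c]) (g (String.ofList [c]) + 1)) n j hcnt]
          -- goal: scanKey (piece ++ X) n = piece ++ scanKey X n
        split_ifs with hb1 hb2
        · simp
        · exact scanKey_append k sup.toList (c :: sup2.toList) _
            (by simp [hks]; exact fun h => hc h.symm) n
        · exact scanKey_append k sup.toList [c] _
            (by simp; exact fun h => hc h.symm) n

-- buildInfo facts, proved with the start dict generalized
theorem buildInfo_get?_aux :
    ∀ (l : List (String × Int)) (d : PySem.Dict String (Int × String)) (key : String),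
    key ∉ l.map Prod.fst →
    ((l.foldl (fun d kv =>
        if PySem.Chars.strIsalpha kv.1.toList && decide (1 < kv.2) then
          d.insert kv.1 (kv.2, (powSup? kv.2).getD "")
        else d) d).get? key = d.get? key) := by
  intro l
  induction l with
  | nil => intros; rfl
  | cons kv t ih =>
    intro d key hk
    simp only [List.map_cons, List.mem_cons, not_or] at hk
    rw [List.foldl_cons, ih _ key hk.2]
    split
    · rw [PySem.Dict.get?_insert, if_neg hk.1]
    · rfl

theorem buildInfo_get?_none (l : List (String × Int)) (key : String) (h : key ∉ l.map Prod.fst) :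
    (buildInfo l).get? key = none := by
  unfold buildInfo
  rw [buildInfo_get?_aux l _ key h]
  exact PySem.Dict.get?_empty key

theorem powSup_getD_high (x : Int) : ∀ ch ∈ ((powSup? x).getD "").toList, 128 ≤ ch.toNat := by
  unfold powSup?
  split_ifs <;> simp

theorem buildInfo_sup_aux :
    ∀ (l : List (String × Int)) (d : PySem.Dict String (Int × String)),
    (∀ t e, d.get? t = some e → ∀ ch ∈ e.2.toList, 128 ≤ ch.toNat) →
    ∀ t e, ((l.foldl (fun d kv =>
        if PySem.Chars.strIsalpha kv.1.toList && decide (1 < kv.2) then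
          d.insert kv.1 (kv.2, (powSup? kv.2).getD "")
        else d) d).get? t = some e) → ∀ ch ∈ e.2.toList, 128 ≤ ch.toNat := by
  intro l
  induction l with
  | nil => intro d hd; exact hd
  | cons kv t ih =>
    intro d hd
    rw [List.foldl_cons]
    apply ih
    intro t' e he
    split at he
    · rw [PySem.Dict.get?_insert] at he
      split at he
      · cases he; exact powSup_getD_high kv.2
      · exact hd _ _ he
    · exact hd _ _ he

theorem buildInfo_sup (l : List (String × Int)) (t : String) (e : Int × String)
    (h : (buildInfo l).get? t = some e) : ∀ ch ∈ e.2.toList, 128 ≤ ch.toNat := by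
  refine buildInfo_sup_aux l PySem.Dict.empty ?_ t e h
  intro t' e' he'
  rw [PySem.Dict.get?_empty] at he'
  cases he'

theorem mem_foldl_insert :
    ∀ (l : List (String × Int)) (d : PySem.Dict String Int) (p : String × Int),
    p ∈ (l.foldl (fun d kv => d.insert kv.1 kv.2) d).items → p ∈ d.items ∨ p ∈ l := by
  intro l
  induction l with
  | nil => intro d p h; exact Or.inl h
  | cons kv t ih =>
    intro d p h
    rw [List.foldl_cons] at h
    rcases ih _ p h with h' | h'
    · rw [PySem.Dict.mem_items_insert] at h'
      rcases h' with h' | h'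
      · exact Or.inr (by simp [h'])
      · exact Or.inl h'.1
    · exact Or.inr (List.mem_cons_of_mem _ h')

theorem mem_items_ofList (l : List (String × Int)) (p : String × Int)
    (h : p ∈ (PySem.Dict.ofList l).items) : p ∈ l := by
  rcases mem_foldl_insert l PySem.Dict.empty p h with h' | h'
  · have he : (PySem.Dict.empty : PySem.Dict String Int).items = [] := rfl
    rw [he] at h'
    cases h'
  · exact h'

-- main assembly: A's left fold over the dict items equals the simultaneous scan with the full table
theorem main_fold :
    ∀ (items : List (String × Int)) (s : List Char),
    (items.map Prod.fst).Nodup →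
    (∀ kv ∈ items, PySem.Chars.strIsalpha kv.1.toList = true → 1 < kv.2 → (kv.1.toList.length = 1 ∧ kv.2 ≤ 9)) →
    (∀ kv ∈ items, pvDomStr kv.1 = true) →
    items.foldl (fun ret kv =>
      if PySem.Chars.strIsalpha kv.1.toList && decide (1 < kv.2) then
        replaceN (replaceN ret kv.1.toList [] (kv.2 - 1).toNat) kv.1.toList
          (kv.1.toList ++ ((powSup? kv.2).getD "").toList) 1
      else ret) s
      = scanF (buildInfo items).get? s (fun _ => 0) := by
  intro items
  induction items using List.reverseRecOn with
  | nil =>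
    intro s _ _ _
    simp only [List.foldl_nil]
    have hbe : buildInfo ([] : List (String × Int)) = PySem.Dict.empty := rfl
    rw [hbe]
    exact (scanF_of_none (PySem.Dict.empty : PySem.Dict String (Int × String)).get?
      (fun t => PySem.Dict.get?_empty t) s (fun _ => 0)).symm
  | append_singleton l it ih =>
    intro s hnd hpre hdom
    have hnd' : (l.map Prod.fst).Nodup := by
      rw [List.map_append] at hnd; exact hnd.of_append_left
    have hfresh : it.1 ∉ l.map Prod.fst := by
      rw [List.map_append] at hnd
      intro hmem
      exact (List.disjoint_of_nodup_append hnd) hmem (by simp)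
    have hpre' : ∀ kv ∈ l, PySem.Chars.strIsalpha kv.1.toList = true → 1 < kv.2 → (kv.1.toList.length = 1 ∧ kv.2 ≤ 9) :=
      fun kv h => hpre kv (List.mem_append_left _ h)
    have hdom' : ∀ kv ∈ l, pvDomStr kv.1 = true :=
      fun kv h => hdom kv (List.mem_append_left _ h)
    rw [List.foldl_append, List.foldl_cons, List.foldl_nil, ih s hnd' hpre' hdom']
    have hbuild : buildInfo (l ++ [it]) = (if PySem.Chars.strIsalpha it.1.toList && decide (1 < it.2) then
        (buildInfo l).insert it.1 (it.2, (powSup? it.2).getD "") else buildInfo l) := by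
      unfold buildInfo
      rw [List.foldl_append, List.foldl_cons, List.foldl_nil]
    rcases Bool.eq_false_or_eq_true (PySem.Chars.strIsalpha it.1.toList && decide (1 < it.2)) with hq | hq
    · -- qualifying key
      have halpha : PySem.Chars.strIsalpha it.1.toList = true := by
        simp only [Bool.and_eq_true, decide_eq_true_eq] at hq; exact hq.1
      have hgt : 1 < it.2 := by
        simp only [Bool.and_eq_true, decide_eq_true_eq] at hq; exact hq.2
      obtain ⟨hlen, hle9⟩ := hpre it (by simp) halpha hgt
      obtain ⟨k, hk⟩ := List.length_eq_one_iff.mp hlen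
      have hit1 : it.1 = String.ofList [k] := by rw [← hk]; simp
      obtain ⟨sup, hsup⟩ : ∃ sup, powSup? it.2 = some sup := by
        rcases (by omega : it.2 = 2 ∨ it.2 = 3 ∨ it.2 = 4 ∨ it.2 = 5 ∨ it.2 = 6 ∨ it.2 = 7 ∨ it.2 = 8 ∨ it.2 = 9) with h|h|h|h|h|h|h|h <;>
          rw [h] <;> exact ⟨_, rfl⟩
      have hf : (buildInfo l).get? (String.ofList [k]) = none := by
        rw [← hit1]; exact buildInfo_get?_none l it.1 hfresh
      have hklow : k.toNat ≤ 126 := by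
        have hd := hdom it (by simp)
        unfold pvDomStr at hd
        rw [hk] at hd
        simp [pvDomChar] at hd
        omega
      have hsups : ∀ t e, (buildInfo l).get? t = some e → k ∉ e.2.toList := by
        intro t e he hmem
        have := buildInfo_sup l t e he k hmem
        omega
      have hcomm := scanKey_scanF_comm (buildInfo l).get? k it.2 sup hf hsups s
        (fun _ => 0) (it.2 - 1).toNat 0 (by omega)
      have hzero : updF (fun _ => (0 : Int)) (String.ofList [k]) 0 = fun _ => (0 : Int) := by
        funext t; by_cases h : t = String.ofList [k] <;> simp [updF, h]
      have hB : buildInfo (l ++ [it]) = (buildInfo l).insert it.1 (it.2, (powSup? it.2).getD "") := by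
        rw [hbuild]; simp [hq]
      have htable : updF (buildInfo l).get? (String.ofList [k]) (some (it.2, sup))
          = ((buildInfo l).insert it.1 (it.2, (powSup? it.2).getD "")).get? := by
        funext t
        rw [PySem.Dict.get?_insert, hsup]
        by_cases h : t = it.1 <;> simp [updF, h, hit1]
      have hone : (if (PySem.Chars.strIsalpha it.1.toList && decide (1 < it.2)) = true then
          replaceN (replaceN (scanF (buildInfo l).get? s fun _ => 0) it.1.toList [] (it.2 - 1).toNat) it.1.toList
            (it.1.toList ++ ((powSup? it.2).getD "").toList) 1
        else (scanF (buildInfo l).get? s fun _ => 0))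
          = replaceN (replaceN (scanF (buildInfo l).get? s fun _ => 0) it.1.toList [] (it.2 - 1).toNat) it.1.toList
            (it.1.toList ++ ((powSup? it.2).getD "").toList) 1 := by
        simp [hq]
      rw [hone]
      simp only [hk, List.singleton_append]
      rw [astep_eq_scanKey k (((powSup? it.2).getD "").toList), hsup]
      simp only [Option.getD_some]
      rw [hcomm, hzero, htable, ← hB]
    · -- non-qualifying key: both sides unchanged
      have hone : (if (PySem.Chars.strIsalpha it.1.toList && decide (1 < it.2)) = true then
          replaceN (replaceN (scanF (buildInfo l).get? s fun _ => 0) it.1.toList [] (it.2 - 1).toNat) it.1.toList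
            (it.1.toList ++ ((powSup? it.2).getD "").toList) 1
        else (scanF (buildInfo l).get? s fun _ => 0))
          = (scanF (buildInfo l).get? s fun _ => 0) := by
        simp [hq]
      have hB : buildInfo (l ++ [it]) = buildInfo l := by
        rw [hbuild]; simp [hq]
      rw [hone, hB]

-- ===== VERDICT (by name: the statement is the Claim_ definition above) =====
theorem colapse_duplicates_spec : Claim_equal_colapse_duplicates := by
  intro count_dict string hdom hpre
  unfold Spec_colapse_duplicates
  simp only [colapse_duplicates, colapse_duplicates_alt]
  have hdomL : ∀ kv ∈ (PySem.Dict.ofList count_dict).items, pvDomStr kv.1 = true := by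
    intro kv hkv
    have hm := mem_items_ofList count_dict kv hkv
    unfold Dom_colapse_duplicates at hdom
    simp only [Bool.and_eq_true, List.all_eq_true] at hdom
    have hb := hdom.1 kv hm
    simp only [Bool.and_eq_true] at hb
    exact hb.1
  have hnd : ((PySem.Dict.ofList count_dict).items.map Prod.fst).Nodup :=
    PySem.Dict.nodup_keys_ofList count_dict
  have hseen : (fun t => (PySem.Dict.empty : PySem.Dict String Int).getD t 0) = fun _ => (0 : Int) := by
    funext t; exact PySem.Dict.getD_empty t 0
  rw [scanB_eq_scanF, hseen,
    main_fold (PySem.Dict.ofList count_dict).items string.toList hnd hpre hdomL]
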